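-- pv_equiv track=rewrite | github.com/architvasan/prot_lig_discdiff | tests/estimate_model_scaling.py | estimate_transformer_params
-- ===== SOURCE A (Python) =====
-- def estimate_transformer_params(dim, n_heads, n_layers, vocab_size, cond_dim, max_seq_len=512):
--     """Estimate transformer parameters."""
--
--     # Embedding layers
--     vocab_embed = vocab_size * dim
--
--     # Time embedding (sigma_map)
--     time_embed = cond_dim * 4  # Typical time embedding size
--
--     # Rotary embedding (no parameters, just computation)
--     rotary_embed = 0
--
--     # Transformer blocks
--     block_params = 0
--     for _ in range(n_layers):
--         # Layer norms (2 per block)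
--         ln_params = 2 * dim * 2  # weight + bias
--
--         # Attention (QKV + output projection)
--         attn_qkv = dim * (3 * dim)  # Q, K, V projections
--         attn_out = dim * dim        # Output projection
--         attn_params = attn_qkv + attn_out
--
--         # MLP (typically 4x expansion)
--         mlp_dim = dim * 4
--         mlp_fc1 = dim * mlp_dim
--         mlp_fc2 = mlp_dim * dim
--         mlp_params = mlp_fc1 + mlp_fc2
--
--         # AdaLN modulation
--         adaln_params = cond_dim * (6 * dim)  # 6 modulation parameters per block
--
--         block_params += ln_params + attn_params + mlp_params + adaln_params
--
--     # Output layer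
--     output_ln = dim * 2  # weight + bias
--     output_linear = dim * vocab_size
--     output_adaln = cond_dim * (2 * dim)  # 2 modulation parameters
--     output_params = output_ln + output_linear + output_adaln
--
--     total_params = vocab_embed + time_embed + block_params + output_params
--
--     return {
--         'vocab_embed': vocab_embed,
--         'time_embed': time_embed,
--         'transformer_blocks': block_params,
--         'output_layer': output_params,
--         'total': total_params
--     }
-- ===== SOURCE B (Python) =====
-- def estimate_transformer_params(dim, n_heads, n_layers, vocab_size, cond_dim, max_seq_len=512):
--     """Estimate transformer parameters (closed form: per-block params times layer count)."""
--     vocab_embed = vocab_size * dim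
--     time_embed = cond_dim * 4
--     per_block = 4 * dim + 4 * dim * dim + 8 * dim * dim + 6 * cond_dim * dim
--     block_params = max(n_layers, 0) * per_block
--     output_params = 2 * dim + dim * vocab_size + 2 * cond_dim * dim
--     total_params = vocab_embed + time_embed + block_params + output_params
--     return {
--         'vocab_embed': vocab_embed,
--         'time_embed': time_embed,
--         'transformer_blocks': block_params,
--         'output_layer': output_params,
--         'total': total_params,
--     }
-- ===== Notes on version B (the rewrite author's own statement) =====
-- stated objective: faster
-- what changed: Replaces the per-layer loop (whose body is constant) with a closed-form product max(n_layers,0) * per_block_params.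
import Mathlib
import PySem

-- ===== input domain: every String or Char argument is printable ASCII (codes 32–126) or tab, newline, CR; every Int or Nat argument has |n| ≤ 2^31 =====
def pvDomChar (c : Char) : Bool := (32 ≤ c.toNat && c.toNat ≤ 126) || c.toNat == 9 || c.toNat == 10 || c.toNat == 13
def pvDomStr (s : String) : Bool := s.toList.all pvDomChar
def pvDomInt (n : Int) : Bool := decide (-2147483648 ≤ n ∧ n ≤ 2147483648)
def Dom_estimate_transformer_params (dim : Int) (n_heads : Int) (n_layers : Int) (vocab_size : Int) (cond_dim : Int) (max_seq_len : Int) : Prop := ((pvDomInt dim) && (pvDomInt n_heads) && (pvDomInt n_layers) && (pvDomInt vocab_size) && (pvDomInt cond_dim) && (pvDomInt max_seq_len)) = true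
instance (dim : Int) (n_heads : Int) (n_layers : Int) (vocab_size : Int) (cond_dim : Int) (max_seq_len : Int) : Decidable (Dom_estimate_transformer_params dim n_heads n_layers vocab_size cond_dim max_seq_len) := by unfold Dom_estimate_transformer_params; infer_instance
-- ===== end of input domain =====

-- B replaces A's per-layer loop (constant body) with a closed-form product: O(1) instead of O(n_layers).

-- ===== PORT A =====
def estimate_transformer_params (dim : Int) (n_heads : Int) (n_layers : Int) (vocab_size : Int) (cond_dim : Int) (max_seq_len : Int) : List (String × Int) :=
  let vocab_embed := vocab_size * dim
  let time_embed := cond_dim * 4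
  let _rotary_embed : Int := 0
  let block_params :=
    (PySem.List.pyRange 0 n_layers 1).foldl (fun acc _ =>
      let ln_params := 2 * dim * 2
      let attn_qkv := dim * (3 * dim)
      let attn_out := dim * dim
      let attn_params := attn_qkv + attn_out
      let mlp_dim := dim * 4
      let mlp_fc1 := dim * mlp_dim
      let mlp_fc2 := mlp_dim * dim
      let mlp_params := mlp_fc1 + mlp_fc2
      let adaln_params := cond_dim * (6 * dim)
      acc + (ln_params + attn_params + mlp_params + adaln_params)) 0
  let output_ln := dim * 2
  let output_linear := dim * vocab_size
  let output_adaln := cond_dim * (2 * dim)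
  let output_params := output_ln + output_linear + output_adaln
  let total_params := vocab_embed + time_embed + block_params + output_params
  [("vocab_embed", vocab_embed), ("time_embed", time_embed),
   ("transformer_blocks", block_params), ("output_layer", output_params),
   ("total", total_params)]

-- ===== PORT B =====
def estimate_transformer_params_alt (dim : Int) (n_heads : Int) (n_layers : Int) (vocab_size : Int) (cond_dim : Int) (max_seq_len : Int) : List (String × Int) :=
  let vocab_embed := vocab_size * dim
  let time_embed := cond_dim * 4
  let per_block := 4 * dim + 4 * dim * dim + 8 * dim * dim + 6 * cond_dim * dim
  let block_params := max n_layers 0 * per_block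
  let output_params := 2 * dim + dim * vocab_size + 2 * cond_dim * dim
  let total_params := vocab_embed + time_embed + block_params + output_params
  [("vocab_embed", vocab_embed), ("time_embed", time_embed),
   ("transformer_blocks", block_params), ("output_layer", output_params),
   ("total", total_params)]

-- ===== PRECONDITION & SPEC =====
def Spec_estimate_transformer_params (dim : Int) (n_heads : Int) (n_layers : Int) (vocab_size : Int) (cond_dim : Int) (max_seq_len : Int) (out : List (String × Int)) : Prop := out = estimate_transformer_params_alt dim n_heads n_layers vocab_size cond_dim max_seq_len
instance (dim : Int) (n_heads : Int) (n_layers : Int) (vocab_size : Int) (cond_dim : Int) (max_seq_len : Int) (out : List (String × Int)) : Decidable (Spec_estimate_transformer_params dim n_heads n_layers vocab_size cond_dim max_seq_len out) := by unfold Spec_estimate_transformer_params; infer_instance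

-- ===== CLAIM =====
def Claim_equal_estimate_transformer_params : Prop := ∀ (dim : Int) (n_heads : Int) (n_layers : Int) (vocab_size : Int) (cond_dim : Int) (max_seq_len : Int), Dom_estimate_transformer_params dim n_heads n_layers vocab_size cond_dim max_seq_len → Spec_estimate_transformer_params dim n_heads n_layers vocab_size cond_dim max_seq_len (estimate_transformer_params dim n_heads n_layers vocab_size cond_dim max_seq_len)

-- ===== LEMMAS AND PROOFS =====

theorem foldl_add_const (c : Int) (l : List Int) (acc : Int) :
    l.foldl (fun a _ => a + c) acc = acc + c * l.length := by
  induction l generalizing acc with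
  | nil => simp
  | cons x xs ih => simp [List.foldl, ih]; ring

theorem block_closed (dim cond_dim n_layers : Int) :
    (PySem.List.pyRange 0 n_layers 1).foldl (fun acc _ =>
      acc + (2 * dim * 2 + (dim * (3 * dim) + dim * dim) + (dim * (dim * 4) + dim * 4 * dim)
        + cond_dim * (6 * dim))) 0
    = max n_layers 0 * (4 * dim + 4 * dim * dim + 8 * dim * dim + 6 * cond_dim * dim) := by
  rw [foldl_add_const, PySem.List.length_pyRange_one]
  have h : ((n_layers - 0).toNat : Int) = max n_layers 0 := by
    rw [Int.toNat_eq_max]; ring_nf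
  rw [h]; ring

-- ===== VERDICT =====
theorem estimate_transformer_params_spec : Claim_equal_estimate_transformer_params := by
  intro dim n_heads n_layers vocab_size cond_dim max_seq_len _
  unfold Spec_estimate_transformer_params estimate_transformer_params estimate_transformer_params_alt
  simp only []
  rw [block_closed]
  simp only [List.cons.injEq, Prod.mk.injEq, true_and, and_true]
  exact ⟨by ring, by ring⟩
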